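-- pv_equiv track=rewrite | github.com/GundalaNikhil/DSA | dsa-problems/Hashing/solutions/python/HSH-012-subarray-hash-equality.py | check_subarray_equality
-- ===== SOURCE A (Python) =====
-- def check_subarray_equality(arr: list, queries: list) -> list:
--     n = len(arr)
--     MOD1 = 10**9 + 7
--     BASE1 = 100003
--     MOD2 = 10**9 + 9
--     BASE2 = 100019
--
--     h1 = [0] * (n + 1)
--     p1 = [1] * (n + 1)
--     h2 = [0] * (n + 1)
--     p2 = [1] * (n + 1)
--
--     for i in range(n):
--         val = arr[i]
--
--         h1[i+1] = (h1[i] * BASE1 + val) % MOD1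
--         p1[i+1] = (p1[i] * BASE1) % MOD1
--
--         h2[i+1] = (h2[i] * BASE2 + val) % MOD2
--         p2[i+1] = (p2[i] * BASE2) % MOD2
--
--     def get_hash(h, p, l, r, mod):
--         length = r - l + 1
--         return (h[r+1] - h[l] * p[length]) % mod
--
--     results = []
--     for l1, r1, l2, r2 in queries:
--         if r1 - l1 != r2 - l2:
--             results.append(False)
--             continue
--
--         hash1_s1 = get_hash(h1, p1, l1, r1, MOD1)
--         hash1_s2 = get_hash(h1, p1, l2, r2, MOD1)
--
--         if hash1_s1 != hash1_s2:
--             results.append(False)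
--             continue
--
--         hash2_s1 = get_hash(h2, p2, l1, r1, MOD2)
--         hash2_s2 = get_hash(h2, p2, l2, r2, MOD2)
--
--         results.append(hash2_s1 == hash2_s2)
--
--     return results
-- ===== SOURCE B (Python) =====
-- def check_subarray_equality(arr: list, queries: list) -> list:
--     MOD1 = 10**9 + 7
--     BASE1 = 100003
--     MOD2 = 10**9 + 9
--     BASE2 = 100019
--
--     def seg_hash(l, r, base, mod):
--         h = 0
--         for k in range(l, r + 1):
--             h = (h * base + arr[k]) % mod
--         return h
--
--     def answer(l1, r1, l2, r2):
--         if r1 - l1 != r2 - l2: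
--             return False
--         if seg_hash(l1, r1, BASE1, MOD1) != seg_hash(l2, r2, BASE1, MOD1):
--             return False
--         return seg_hash(l1, r1, BASE2, MOD2) == seg_hash(l2, r2, BASE2, MOD2)
--
--     return [answer(*q) for q in queries]
-- ===== Notes on version B (the rewrite author's own statement) =====
-- stated objective: simpler
-- what changed: Removed the precomputed prefix-hash and power arrays entirely: each query's subarray hashes are recomputed by a direct left-to-right scan with the same double (BASE,MOD) multiply-add recurrence, and the query loop becomes a list comprehension over a per-query answer function.
-- outside the precondition, e.g. on check_subarray_equality([1, 2], [(-1, -1, 1, 1)]): A returns [False], B returns [True]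
import Mathlib
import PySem

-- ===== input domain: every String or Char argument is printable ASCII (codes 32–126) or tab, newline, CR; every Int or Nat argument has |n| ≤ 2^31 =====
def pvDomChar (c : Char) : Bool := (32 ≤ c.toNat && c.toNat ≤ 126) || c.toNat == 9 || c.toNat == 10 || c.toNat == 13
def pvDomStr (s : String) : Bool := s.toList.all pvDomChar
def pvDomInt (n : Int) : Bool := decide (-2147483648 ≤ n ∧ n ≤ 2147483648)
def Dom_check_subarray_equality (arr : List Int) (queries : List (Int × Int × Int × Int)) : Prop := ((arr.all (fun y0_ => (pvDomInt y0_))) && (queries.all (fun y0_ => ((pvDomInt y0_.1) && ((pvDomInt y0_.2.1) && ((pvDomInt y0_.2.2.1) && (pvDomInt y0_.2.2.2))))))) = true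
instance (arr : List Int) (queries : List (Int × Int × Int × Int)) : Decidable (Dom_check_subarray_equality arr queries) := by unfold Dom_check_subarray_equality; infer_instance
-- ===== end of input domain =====

-- B drops A's precomputed prefix-hash/power arrays and recomputes each query's double (BASE,MOD)
-- polynomial hashes by a direct scan of the subarray (objective: simpler; same results, including
-- any hash-collision false positives).

-- ===== PORT A =====
-- the loop 'for i in range(n): h[i+1] = (h[i]*BASE+val)%MOD' filling a prefix array left to right,
-- as the obvious structural recursion producing [h[0], h[1], …, h[n]]
def pvScanH (B M : Int) : Int → List Int → List Int
  | a, [] => [a]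
  | a, v :: t => a :: pvScanH B M (PySem.Int.mod (a * B + v) M) t

-- same loop for 'p[i+1] = (p[i]*BASE)%MOD'
def pvScanP (B M : Int) : Int → List Int → List Int
  | a, [] => [a]
  | a, _ :: t => a :: pvScanP B M (PySem.Int.mod (a * B) M) t

-- Python's get_hash(h, p, l, r, mod); list indexing via pyGet? (default 0 only where Python raises, excluded by Pre_)
def pvGetHash (h p : List Int) (l r M : Int) : Int :=
  PySem.Int.mod ((PySem.List.pyGet? h (r + 1)).getD 0
    - (PySem.List.pyGet? h l).getD 0 * (PySem.List.pyGet? p (r - l + 1)).getD 0) M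

-- the body of A's query loop (each 'continue' path appends exactly one Bool)
def pvAnsA (h1 p1 h2 p2 : List Int) (q : Int × Int × Int × Int) : Bool :=
  match q with
  | (l1, r1, l2, r2) =>
    if r1 - l1 ≠ r2 - l2 then false
    else if pvGetHash h1 p1 l1 r1 1000000007 ≠ pvGetHash h1 p1 l2 r2 1000000007 then false
    else decide (pvGetHash h2 p2 l1 r1 1000000009 = pvGetHash h2 p2 l2 r2 1000000009)

def check_subarray_equality (arr : List Int) (queries : List (Int × Int × Int × Int)) : List Bool :=
  let h1 := pvScanH 100003 1000000007 0 arr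
  let p1 := pvScanP 100003 1000000007 1 arr
  let h2 := pvScanH 100019 1000000009 0 arr
  let p2 := pvScanP 100019 1000000009 1 arr
  queries.foldl (fun res q => res ++ [pvAnsA h1 p1 h2 p2 q]) []

-- ===== PORT B =====
-- seg_hash: 'h = 0; for k in range(l, r+1): h = (h*base + arr[k]) % mod'
def pvSegHash (arr : List Int) (l r B M : Int) : Int :=
  (PySem.List.pyRange l (r + 1) 1).foldl
    (fun h k => PySem.Int.mod (h * B + PySem.List.pyGetD arr k 0) M) 0

-- B's per-query 'answer'
def pvAnsB (arr : List Int) (q : Int × Int × Int × Int) : Bool :=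
  match q with
  | (l1, r1, l2, r2) =>
    if r1 - l1 ≠ r2 - l2 then false
    else if pvSegHash arr l1 r1 100003 1000000007 ≠ pvSegHash arr l2 r2 100003 1000000007 then false
    else decide (pvSegHash arr l1 r1 100019 1000000009 = pvSegHash arr l2 r2 100019 1000000009)

def check_subarray_equality_alt (arr : List Int) (queries : List (Int × Int × Int × Int)) : List Bool :=
  queries.map (pvAnsB arr)

-- ===== PRECONDITION & SPEC =====
-- Pre_ excludes queries of equal stated length whose endpoints fall outside 0..n-1 (with l ≤ r+1):
-- there A either raises IndexError or returns an accidental value via Python negative-index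
-- wraparound into its prefix arrays, and B's wraparound into arr is just as accidental.
def Pre_check_subarray_equality (arr : List Int) (queries : List (Int × Int × Int × Int)) : Prop :=
  ∀ q ∈ queries, q.2.1 - q.1 = q.2.2.2 - q.2.2.1 →
    (0 ≤ q.1 ∧ q.1 ≤ q.2.1 + 1 ∧ q.2.1 < (arr.length : Int) ∧
     0 ≤ q.2.2.1 ∧ q.2.2.1 ≤ q.2.2.2 + 1 ∧ q.2.2.2 < (arr.length : Int))
instance (arr : List Int) (queries : List (Int × Int × Int × Int)) : Decidable (Pre_check_subarray_equality arr queries) := by unfold Pre_check_subarray_equality; infer_instance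

def pvWitness_check_subarray_equality : List Int × (List (Int × Int × Int × Int)) :=
  ([1, 2, 1, 2], [(0, 1, 2, 3), (0, 0, 1, 1), (0, 1, 1, 2), (0, 3, 0, 1)])

def Spec_check_subarray_equality (arr : List Int) (queries : List (Int × Int × Int × Int)) (out : List Bool) : Prop := out = check_subarray_equality_alt arr queries
instance (arr : List Int) (queries : List (Int × Int × Int × Int)) (out : List Bool) : Decidable (Spec_check_subarray_equality arr queries out) := by unfold Spec_check_subarray_equality; infer_instance

-- ===== CLAIM (what is proved, stated in full; the proofs are below) =====
def Claim_equal_check_subarray_equality : Prop := ∀ (arr : List Int) (queries : List (Int × Int × Int × Int)), Dom_check_subarray_equality arr queries → Pre_check_subarray_equality arr queries → Spec_check_subarray_equality arr queries (check_subarray_equality arr queries)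

-- ===== LEMMAS AND PROOFS =====

-- the pure (un-modded) polynomial fold and the modded fold
def pvPure (B a : Int) (xs : List Int) : Int := xs.foldl (fun x v => x * B + v) a
def pvHmod (B M a : Int) (xs : List Int) : Int := xs.foldl (fun x v => PySem.Int.mod (x * B + v) M) a
def pvPowM (B M : Int) : Int → Nat → Int
  | a, 0 => a
  | a, i + 1 => pvPowM B M (PySem.Int.mod (a * B) M) i

theorem pvScanH_getElem? (B M : Int) : ∀ (xs : List Int) (a : Int) (i : Nat), i ≤ xs.length →
    (pvScanH B M a xs)[i]? = some (pvHmod B M a (xs.take i))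
  | [], a, 0, _ => by simp [pvScanH, pvHmod]
  | [], a, i + 1, h => by simp at h
  | v :: t, a, 0, _ => by simp [pvScanH, pvHmod]
  | v :: t, a, i + 1, h => by
      simpa [pvScanH, pvHmod] using
        pvScanH_getElem? B M t (PySem.Int.mod (a * B + v) M) i (by simpa using h)

theorem pvScanP_getElem? (B M : Int) : ∀ (xs : List Int) (a : Int) (i : Nat), i ≤ xs.length →
    (pvScanP B M a xs)[i]? = some (pvPowM B M a i)
  | [], a, 0, _ => by simp [pvScanP, pvPowM]
  | [], a, i + 1, h => by simp at h
  | v :: t, a, 0, _ => by simp [pvScanP, pvPowM]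
  | v :: t, a, i + 1, h => by
      simpa [pvScanP, pvPowM] using
        pvScanP_getElem? B M t (PySem.Int.mod (a * B) M) i (by simpa using h)

theorem pvPure_cong (B M : Int) : ∀ (xs : List Int) (a b : Int), a % M = b % M →
    pvPure B a xs % M = pvPure B b xs % M
  | [], a, b, h => h
  | v :: t, a, b, h => by
      simpa [pvPure, List.foldl_cons] using
        pvPure_cong B M t (a * B + v) (b * B + v) ((Int.ModEq.mul_right B h).add_right v)

theorem pvHmod_eq_pure (B M : Int) (hM : 0 < M) : ∀ (xs : List Int) (a : Int),
    pvHmod B M a xs % M = pvPure B a xs % M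
  | [], a => rfl
  | v :: t, a => by
      have h1 := pvHmod_eq_pure B M hM t (PySem.Int.mod (a * B + v) M)
      have h2 : PySem.Int.mod (a * B + v) M % M = (a * B + v) % M := by
        rw [PySem.Int.mod_eq_emod_of_pos hM]; exact Int.emod_emod_of_dvd _ dvd_rfl
      simpa [pvHmod, pvPure, List.foldl_cons] using h1.trans (pvPure_cong B M t _ _ h2)

theorem pvHmod_self (B M : Int) (hM : 0 < M) : ∀ (xs : List Int) (a : Int), a % M = a →
    pvHmod B M a xs % M = pvHmod B M a xs
  | [], a, ha => ha
  | v :: t, a, ha => by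
      have hstep : PySem.Int.mod (a * B + v) M % M = PySem.Int.mod (a * B + v) M := by
        rw [PySem.Int.mod_eq_emod_of_pos hM]; exact Int.emod_emod_of_dvd _ dvd_rfl
      simpa [pvHmod, List.foldl_cons] using pvHmod_self B M hM t (PySem.Int.mod (a * B + v) M) hstep

theorem pvPure_shift (B : Int) : ∀ (ys : List Int) (a : Int),
    pvPure B a ys = a * B ^ ys.length + pvPure B 0 ys
  | [], a => by simp [pvPure]
  | v :: t, a => by
      have h1 := pvPure_shift B t (a * B + v)
      have h2 := pvPure_shift B t (0 * B + v)
      simp only [pvPure, List.foldl_cons] at h1 h2 ⊢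
      rw [h1, h2, List.length_cons]
      ring

theorem pvPowM_mod (B M : Int) (hM : 0 < M) : ∀ (i : Nat) (a : Int),
    pvPowM B M a i % M = a * B ^ i % M
  | 0, a => by simp [pvPowM]
  | i + 1, a => by
      have h1 := pvPowM_mod B M hM i (PySem.Int.mod (a * B) M)
      have h2 : PySem.Int.mod (a * B) M % M = a * B % M := by
        rw [PySem.Int.mod_eq_emod_of_pos hM]; exact Int.emod_emod_of_dvd _ dvd_rfl
      calc pvPowM B M (PySem.Int.mod (a * B) M) i % M
          = PySem.Int.mod (a * B) M * B ^ i % M := h1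
        _ = a * B * B ^ i % M := Int.ModEq.mul_right (B ^ i) h2
        _ = a * B ^ (i + 1) % M := by ring_nf

-- '[arr[k] for k in range(a, a+cnt)]' is the segment of arr starting at a (0 ≤ a, a+cnt ≤ n)
theorem pvRangeMap (arr : List Int) : ∀ (cnt : Nat) (a : Int), 0 ≤ a → a + cnt ≤ (arr.length : Int) →
    (PySem.List.pyRange a (a + cnt) 1).map (fun k => PySem.List.pyGetD arr k 0)
      = (arr.drop a.toNat).take cnt
  | 0, a, _, _ => by
      rw [PySem.List.pyRange_one_eq_nil (by omega : a + ((0 : Nat) : Int) ≤ a)]; simp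
  | cnt + 1, a, ha, hlen => by
      have hlt : a < a + ((cnt : Nat) + 1 : Nat) := by push_cast; omega
      rw [PySem.List.pyRange_one_cons hlt, List.map_cons]
      have hrec := pvRangeMap arr cnt (a + 1) (by omega) (by push_cast at hlen ⊢; omega)
      have harg : (a + 1) + (cnt : Int) = a + ((cnt : Nat) + 1 : Nat) := by push_cast; ring
      rw [harg] at hrec
      rw [hrec]
      have hidx : a.toNat < arr.length := by omega
      have hget : PySem.List.pyGetD arr a 0 = arr[a.toNat] :=
        PySem.List.pyGetD_eq_getElem arr 0 ha (by push_cast at hlen; omega)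
      have hdrop : arr.drop a.toNat = arr[a.toNat] :: arr.drop (a.toNat + 1) :=
        (List.getElem_cons_drop hidx).symm
      have htn : (a + 1).toNat = a.toNat + 1 := by omega
      rw [hget, htn, hdrop, List.take_succ_cons]

-- core: A's prefix-array hash of [l..r] equals B's direct scan hash (0 ≤ l ≤ r+1 ≤ n)
theorem pvQueryEq (arr : List Int) (B M l r : Int) (hM : 1 < M)
    (hl : 0 ≤ l) (hlr : l ≤ r + 1) (hr : r < (arr.length : Int)) :
    pvGetHash (pvScanH B M 0 arr) (pvScanP B M 1 arr) l r M = pvSegHash arr l r B M := by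
  have hM0 : 0 < M := by omega
  have hR : ((r + 1).toNat : Int) = r + 1 := by omega
  have hL : (l.toNat : Int) = l := by omega
  have hRn : (r + 1).toNat ≤ arr.length := by omega
  have hLn : l.toNat ≤ arr.length := by omega
  have hlen : r - l + 1 = (((r + 1).toNat - l.toNat : Nat) : Int) := by omega
  have hlenn : (r + 1).toNat - l.toNat ≤ arr.length := by omega
  set cnt : Nat := (r + 1).toNat - l.toNat with hcnt
  -- resolve A's three list lookups
  have g1 : PySem.List.pyGet? (pvScanH B M 0 arr) (r + 1)
      = some (pvHmod B M 0 (arr.take (r + 1).toNat)) := by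
    rw [show (r + 1 : Int) = ((r + 1).toNat : Int) from hR.symm,
        PySem.List.pyGet?_natCast, pvScanH_getElem? B M arr 0 _ hRn]
    rw [Int.toNat_natCast]
  have g2 : PySem.List.pyGet? (pvScanH B M 0 arr) l
      = some (pvHmod B M 0 (arr.take l.toNat)) := by
    rw [show (l : Int) = (l.toNat : Int) from hL.symm,
        PySem.List.pyGet?_natCast, pvScanH_getElem? B M arr 0 _ hLn]
    rw [Int.toNat_natCast]
  have g3 : PySem.List.pyGet? (pvScanP B M 1 arr) (r - l + 1)
      = some (pvPowM B M 1 cnt) := by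
    rw [show (r - l + 1 : Int) = ((cnt : Nat) : Int) from by omega,
        PySem.List.pyGet?_natCast, pvScanP_getElem? B M arr 1 _ hlenn]
  rw [pvGetHash, g1, g2, g3, PySem.Int.mod_eq_emod_of_pos hM0]
  simp only [Option.getD_some]
  -- resolve B's scan into a fold over the segment
  have hrange : (l : Int) + (cnt : Int) = r + 1 := by omega
  have hmapped := pvRangeMap arr cnt l hl (by omega)
  rw [hrange] at hmapped
  have hB : pvSegHash arr l r B M
      = pvHmod B M 0 ((arr.drop l.toNat).take cnt) := by
    rw [pvSegHash, pvHmod, ← hmapped, List.foldl_map]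
  rw [hB]
  set seg : List Int := (arr.drop l.toNat).take cnt with hseg
  have hseglen : seg.length = cnt := by
    simp [hseg, List.length_take, List.length_drop]; omega
  have hsplit : arr.take (r + 1).toNat = arr.take l.toNat ++ seg := by
    have : (r + 1).toNat = l.toNat + cnt := by omega
    rw [this, List.take_add]
  -- pass to the pure polynomial, split, and shift
  have e1 : pvHmod B M 0 (arr.take (r + 1).toNat) % M
      = pvPure B 0 (arr.take (r + 1).toNat) % M := pvHmod_eq_pure B M hM0 _ 0
  have e2 : pvHmod B M 0 (arr.take l.toNat) % M
      = pvPure B 0 (arr.take l.toNat) % M := pvHmod_eq_pure B M hM0 _ 0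
  have e3 : pvPowM B M 1 cnt % M = 1 * B ^ cnt % M := pvPowM_mod B M hM0 cnt 1
  have hsub : (pvHmod B M 0 (arr.take (r + 1).toNat)
        - pvHmod B M 0 (arr.take l.toNat) * pvPowM B M 1 cnt) % M
      = (pvPure B 0 (arr.take (r + 1).toNat)
        - pvPure B 0 (arr.take l.toNat) * (1 * B ^ cnt)) % M :=
    Int.ModEq.sub e1 (Int.ModEq.mul e2 e3)
  have hval : pvPure B 0 (arr.take (r + 1).toNat)
      - pvPure B 0 (arr.take l.toNat) * (1 * B ^ cnt) = pvPure B 0 seg := by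
    rw [hsplit, pvPure, List.foldl_append, ← pvPure, ← pvPure,
        pvPure_shift B seg (pvPure B 0 (arr.take l.toNat)), hseglen]
    ring
  rw [hsub, hval, ← pvHmod_eq_pure B M hM0 seg 0,
      pvHmod_self B M hM0 seg 0 (by simp)]

-- per-query agreement under the query's bounds
theorem pvAns_eq (arr : List Int) (q : Int × Int × Int × Int)
    (hq : q.2.1 - q.1 = q.2.2.2 - q.2.2.1 →
      (0 ≤ q.1 ∧ q.1 ≤ q.2.1 + 1 ∧ q.2.1 < (arr.length : Int) ∧
       0 ≤ q.2.2.1 ∧ q.2.2.1 ≤ q.2.2.2 + 1 ∧ q.2.2.2 < (arr.length : Int))) :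
    pvAnsA (pvScanH 100003 1000000007 0 arr) (pvScanP 100003 1000000007 1 arr)
           (pvScanH 100019 1000000009 0 arr) (pvScanP 100019 1000000009 1 arr) q
      = pvAnsB arr q := by
  obtain ⟨l1, r1, l2, r2⟩ := q
  by_cases hlen : r1 - l1 = r2 - l2
  · obtain ⟨h1, h2, h3, h4, h5, h6⟩ := hq hlen
    simp only [pvAnsA, pvAnsB,
      pvQueryEq arr 100003 1000000007 l1 r1 (by norm_num) h1 h2 h3,
      pvQueryEq arr 100003 1000000007 l2 r2 (by norm_num) h4 h5 h6,
      pvQueryEq arr 100019 1000000009 l1 r1 (by norm_num) h1 h2 h3,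
      pvQueryEq arr 100019 1000000009 l2 r2 (by norm_num) h4 h5 h6]
  · simp [pvAnsA, pvAnsB, hlen]

-- ===== VERDICT (by name: the statement is the Claim_ definition above) =====
theorem check_subarray_equality_spec : Claim_equal_check_subarray_equality := by
  intro arr queries _ hpre
  unfold Spec_check_subarray_equality check_subarray_equality check_subarray_equality_alt
  rw [PySem.List.foldl_append_singleton_eq_map, List.nil_append]
  exact List.map_congr_left (fun q hqmem => pvAns_eq arr q (hpre q hqmem))
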